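-- pv_equiv track=rewrite | github.com/lang22/contract_ai | code/exam_clause/sentence_masked.py | __get_highlight_string_slices
-- ===== SOURCE A (Python) =====
-- def __get_highlight_string_slices(diff_string: str):
--     """
--     得到高亮的颜色的切片list
--     :param string:
--     :param diff_string:
--     :return:
--     """
--
--     p, color = 0, diff_string[0]
--     slices = list()
--     for i, s in enumerate(diff_string):
--         if s != color:
--             slices.append((p, i, color))
--             p, color = i, diff_string[i]
--     if p != len(diff_string):
--         slices.append((p, len(diff_string), color))
--     return slices
-- ===== SOURCE B (Python) =====
-- def __get_highlight_string_slices(diff_string: str):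
--     n = len(diff_string)
--     bounds = [0] + [i for i in range(1, n) if diff_string[i] != diff_string[i - 1]] + [n]
--     return [(bounds[j], bounds[j + 1], diff_string[bounds[j]])
--             for j in range(len(bounds) - 1)]
-- ===== Notes on version B (the rewrite author's own statement) =====
-- stated objective: alternative
-- what changed: Replaces A's single stateful accumulator loop (tracking run start, current color and appending slices inline) with a two-pass decomposition: first build a boundary-index table [0]+[i : s[i]!=s[i-1]]+[n], then pair consecutive boundaries into slices.
import Mathlib
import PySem

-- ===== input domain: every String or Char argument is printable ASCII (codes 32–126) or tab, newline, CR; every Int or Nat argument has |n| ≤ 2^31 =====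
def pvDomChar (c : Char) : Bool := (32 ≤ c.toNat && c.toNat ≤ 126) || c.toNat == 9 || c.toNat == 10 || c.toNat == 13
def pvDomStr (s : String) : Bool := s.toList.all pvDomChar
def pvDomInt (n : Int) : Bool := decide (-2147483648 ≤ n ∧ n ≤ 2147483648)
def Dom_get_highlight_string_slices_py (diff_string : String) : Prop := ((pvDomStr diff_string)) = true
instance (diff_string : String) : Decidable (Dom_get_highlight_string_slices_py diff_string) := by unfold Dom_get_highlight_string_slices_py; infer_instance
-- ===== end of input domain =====

-- B rebuilds the run-length slices in two passes — a boundary-index table, then a pairing pass —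
-- instead of A's single stateful loop; objective: alternative decomposition (no speed claim).

-- ===== PORT A =====
-- A's loop body and the trailing `if p != len(...)` append, as named helpers.
def pvStepA (cs : List Char) (acc : Int × Char × List (Int × Int × String))
    (is : Int × Char) : Int × Char × List (Int × Int × String) :=
  if is.2 ≠ acc.2.1 then
    (is.1, PySem.List.pyGetD cs is.1 ' ',
     acc.2.2 ++ [(acc.1, is.1, String.ofList [acc.2.1])])
  else acc

def pvFinA (n : Int) (st : Int × Char × List (Int × Int × String)) :
    List (Int × Int × String) :=
  if st.1 ≠ n then st.2.2 ++ [(st.1, n, String.ofList [st.2.1])] else st.2.2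

def get_highlight_string_slices_py (diff_string : String) : List (Int × Int × String) :=
  let cs := diff_string.toList
  -- p, color = 0, diff_string[0]  (IndexError on "" — excluded by Pre_)
  let color0 := PySem.List.pyGetD cs 0 ' '
  pvFinA (PySem.Str.len diff_string)
    ((PySem.List.enumerate cs 0).foldl (pvStepA cs) ((0 : Int), color0, []))

-- ===== PORT B =====
def get_highlight_string_slices_py_alt (diff_string : String) : List (Int × Int × String) :=
  let cs := diff_string.toList
  let n : Int := PySem.Str.len diff_string
  let bounds : List Int :=
    [0] ++ (PySem.List.pyRange 1 n 1).filter
      (fun i => PySem.List.pyGetD cs i ' ' != PySem.List.pyGetD cs (i - 1) ' ') ++ [n]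
  (PySem.List.pyRange 0 (PySem.List.len bounds - 1) 1).map
    (fun j => (PySem.List.pyGetD bounds j 0, PySem.List.pyGetD bounds (j + 1) 0,
      String.ofList [PySem.List.pyGetD cs (PySem.List.pyGetD bounds j 0) ' ']))

-- ===== PRECONDITION & SPEC =====
-- Pre_ excludes only the empty string, on which A (and B) raise IndexError via diff_string[0].
def Pre_get_highlight_string_slices_py (diff_string : String) : Prop := diff_string.toList ≠ []
instance (diff_string : String) : Decidable (Pre_get_highlight_string_slices_py diff_string) := by unfold Pre_get_highlight_string_slices_py; infer_instance
def pvWitness_get_highlight_string_slices_py : String := "aab"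

def Spec_get_highlight_string_slices_py (diff_string : String) (out : List (Int × Int × String)) : Prop := out = get_highlight_string_slices_py_alt diff_string
instance (diff_string : String) (out : List (Int × Int × String)) : Decidable (Spec_get_highlight_string_slices_py diff_string out) := by unfold Spec_get_highlight_string_slices_py; infer_instance

-- ===== CLAIM (what is proved, stated in full; the proofs are below) =====
def Claim_equal_get_highlight_string_slices_py : Prop := ∀ (diff_string : String), Dom_get_highlight_string_slices_py diff_string → Pre_get_highlight_string_slices_py diff_string → Spec_get_highlight_string_slices_py diff_string (get_highlight_string_slices_py diff_string)

-- ===== LEMMAS AND PROOFS =====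

-- canonical run-length recursion both ports are reduced to
def pvCanon (p : Int) (color : Char) (i : Int) : List Char → List (Int × Int × String)
  | [] => [(p, i, String.ofList [color])]
  | s :: rest =>
    if s ≠ color then (p, i, String.ofList [color]) :: pvCanon i s (i + 1) rest
    else pvCanon p color (i + 1) rest

-- B's boundary list (after the leading 0), as a recursion
def pvCuts (i : Int) (prev : Char) : List Char → List Int
  | [] => [i]
  | s :: rest => if s ≠ prev then i :: pvCuts (i + 1) s rest else pvCuts (i + 1) s rest

lemma pvA_loop (rest : List Char) : ∀ (pre : List Char) (p : Int) (color : Char)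
    (acc : List (Int × Int × String)), p < ((pre ++ rest).length : Int) →
    pvFinA ((pre ++ rest).length : Int)
      ((PySem.List.enumerate rest (pre.length : Int)).foldl (pvStepA (pre ++ rest)) (p, color, acc))
    = acc ++ pvCanon p color (pre.length : Int) rest := by
  induction rest with
  | nil =>
    intro pre p color acc hp
    simp only [PySem.List.enumerate_nil, List.foldl_nil, List.append_nil] at *
    simp [pvFinA, pvCanon, ne_of_lt hp]
  | cons s rest ih =>
    intro pre p color acc hp
    rw [PySem.List.enumerate_cons, List.foldl_cons]
    have hget : PySem.List.pyGetD (pre ++ s :: rest) ((pre.length : Int)) ' ' = s := by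
      simp [List.getD_eq_getElem?_getD]
    have hlen1 : (pre.length : Int) + 1 = (((pre ++ [s]).length : Nat) : Int) := by simp
    have hre : pre ++ s :: rest = (pre ++ [s]) ++ rest := by simp
    simp only [pvStepA]
    by_cases hs : s ≠ color
    · rw [if_pos hs, hget]
      rw [hlen1, hre]
      rw [ih (pre ++ [s]) (pre.length : Int) s (acc ++ [(p, (pre.length : Int), String.ofList [color])])
        (by simp)]
      simp only [pvCanon]
      rw [if_pos hs, hlen1]
      simp [List.append_assoc]
    · rw [if_neg hs]
      rw [hlen1, hre]
      rw [ih (pre ++ [s]) p color acc (by simp at hp ⊢; omega)]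
      simp only [pvCanon]
      rw [if_neg hs, hlen1]

lemma pvCuts_eq (rest : List Char) : ∀ (q : List Char) (prev : Char),
    (PySem.List.pyRange ((q.length : Int) + 1) ((q.length : Int) + 1 + (rest.length : Int)) 1).filter
      (fun i => PySem.List.pyGetD (q ++ prev :: rest) i ' ' != PySem.List.pyGetD (q ++ prev :: rest) (i - 1) ' ')
    ++ [(q.length : Int) + 1 + (rest.length : Int)]
    = pvCuts ((q.length : Int) + 1) prev rest := by
  induction rest with
  | nil =>
    intro q prev
    rw [PySem.List.pyRange_one_eq_nil (by simp)]
    simp [pvCuts]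
  | cons s rest ih =>
    intro q prev
    rw [PySem.List.pyRange_one_cons (by simp only [List.length_cons]; push_cast; omega), List.filter_cons]
    have hga : PySem.List.pyGetD (q ++ prev :: s :: rest) ((q.length : Int) + 1) ' ' = s := by
      have h1 : ((q.length : Int) + 1) = (((q ++ [prev]).length : Nat) : Int) := by simp
      have h2 : q ++ prev :: s :: rest = (q ++ [prev]) ++ s :: rest := by simp
      rw [h1, h2, PySem.List.pyGetD_natCast]
      simp [List.getD_eq_getElem?_getD]
    have hgb : PySem.List.pyGetD (q ++ prev :: s :: rest) ((q.length : Int) + 1 - 1) ' ' = prev := by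
      have h1 : ((q.length : Int) + 1 - 1) = ((q.length : Nat) : Int) := by ring
      rw [h1, PySem.List.pyGetD_natCast]
      simp [List.getD_eq_getElem?_getD]
    simp only [hga, hgb]
    have e2 : (q.length : Int) + 1 + ((s :: rest).length : Int)
        = ((q ++ [prev]).length : Int) + 1 + (rest.length : Int) := by
      simp only [List.length_append, List.length_cons, List.length_nil]; push_cast; ring
    have e1 : (q.length : Int) + 1 + 1 = ((q ++ [prev]).length : Int) + 1 := by
      simp only [List.length_append, List.length_cons, List.length_nil]; push_cast; ring
    have e3 : q ++ prev :: s :: rest = (q ++ [prev]) ++ s :: rest := by simp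
    rw [e2, e1, e3]
    by_cases hs : s ≠ prev
    · rw [if_pos (by simpa using hs)]
      simp only [pvCuts]
      rw [if_pos hs, e1]
      exact congrArg (List.cons ((q.length : Int) + 1)) (ih (q ++ [prev]) s)
    · rw [if_neg (by simpa using hs)]
      simp only [pvCuts]
      rw [if_neg hs, e1]
      exact ih (q ++ [prev]) s

lemma pvRangePairs {γ : Type} (f : Int → Int → γ) : ∀ (b : List Int),
    (List.range (b.length - 1)).map (fun k => f (b.getD k 0) (b.getD (k + 1) 0))
    = (b.zip b.tail).map (fun pq => f pq.1 pq.2) := by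
  intro b
  induction b with
  | nil => simp
  | cons x b' ih =>
    cases b' with
    | nil => simp
    | cons y t =>
      simp only [List.length_cons, Nat.add_sub_cancel] at ih ⊢
      rw [List.range_succ_eq_map, List.map_cons, List.map_map]
      simp only [List.tail_cons, List.zip_cons_cons, List.map_cons]
      rw [List.tail_cons] at ih
      rw [← ih]
      refine congrArg₂ (· :: ·) ?_ ?_
      · simp
      · apply List.map_congr_left
        intro k _
        simp [Function.comp]

lemma pvPairs_eq (cs : List Char) (b : List Int) :
    (PySem.List.pyRange 0 (PySem.List.len b - 1) 1).map
      (fun j => (PySem.List.pyGetD b j 0, PySem.List.pyGetD b (j + 1) 0,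
        String.ofList [PySem.List.pyGetD cs (PySem.List.pyGetD b j 0) ' ']))
    = (b.zip b.tail).map (fun pq => (pq.1, pq.2, String.ofList [PySem.List.pyGetD cs pq.1 ' '])) := by
  have hr : PySem.List.pyRange 0 (PySem.List.len b - 1) 1
      = (List.range (b.length - 1)).map (Nat.cast : Nat → Int) := by
    rw [PySem.List.pyRange_one]
    have hn : ((PySem.List.len b - 1) - 0).toNat = b.length - 1 := by
      simp only [PySem.List.len_eq]; omega
    rw [hn]
    apply List.map_congr_left; intro k _; simp
  rw [hr, List.map_map,
    ← pvRangePairs (fun a b' => (a, b', String.ofList [PySem.List.pyGetD cs a ' '])) b]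
  apply List.map_congr_left
  intro k hk
  have h2 : ((k : Int) + 1) = (((k + 1 : Nat)) : Int) := by push_cast; ring
  simp only [Function.comp_apply, h2, PySem.List.pyGetD_natCast]

lemma pvZip_canon (rest : List Char) : ∀ (q : List Char) (p : Int) (color : Char),
    PySem.List.pyGetD (q ++ rest) p ' ' = color →
    ((p :: pvCuts ((q.length : Int)) color rest).zip (pvCuts ((q.length : Int)) color rest)).map
      (fun pq => (pq.1, pq.2, String.ofList [PySem.List.pyGetD (q ++ rest) pq.1 ' ']))
    = pvCanon p color ((q.length : Int)) rest := by
  induction rest with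
  | nil =>
    intro q p color h
    simp only [List.append_nil] at h ⊢
    simp [pvCuts, pvCanon, h]
  | cons s rest ih =>
    intro q p color h
    have e3 : q ++ s :: rest = (q ++ [s]) ++ rest := by simp
    have e1 : ((q.length : Int)) + 1 = (((q ++ [s]).length : Nat) : Int) := by simp
    by_cases hs : s ≠ color
    · simp only [pvCuts, pvCanon, if_pos hs]
      simp only [List.zip_cons_cons, List.map_cons]
      congr 1
      · simp [h]
      have hgs : PySem.List.pyGetD ((q ++ [s]) ++ rest) ((q.length : Int)) ' ' = s := by
        rw [← e3]
        simp [List.getD_eq_getElem?_getD]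
      rw [e1, e3]
      exact ih (q ++ [s]) (q.length : Int) s hgs
    · rw [not_not] at hs
      subst hs
      simp only [pvCuts, pvCanon, ne_eq, not_true_eq_false, if_false]
      rw [e1, e3]
      exact ih (q ++ [s]) p s (by rw [← e3]; exact h)

-- ===== VERDICT (by name: the statement is the Claim_ definition above) =====
theorem get_highlight_string_slices_py_spec : Claim_equal_get_highlight_string_slices_py := by
  intro ds hdom hpre
  unfold Spec_get_highlight_string_slices_py
  unfold Pre_get_highlight_string_slices_py at hpre
  obtain ⟨c0, rest, hcs⟩ : ∃ c0 rest, ds.toList = c0 :: rest := by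
    cases h : ds.toList with
    | nil => exact absurd h hpre
    | cons a l => exact ⟨a, l, rfl⟩
  unfold get_highlight_string_slices_py get_highlight_string_slices_py_alt
  simp only [hcs]
  have hlen : PySem.Str.len ds = ((c0 :: rest).length : Int) := by
    simp [PySem.Str.len_eq, hcs]
  rw [hlen]
  -- A side
  have hc0 : PySem.List.pyGetD (c0 :: rest) 0 ' ' = c0 := by
    simp [PySem.List.pyGetD_zero_cons]
  rw [hc0]
  have hA := pvA_loop (c0 :: rest) [] 0 c0 [] (by simp)
  simp only [List.nil_append, List.length_nil, Nat.cast_zero] at hA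
  rw [hA]
  have hcanon : pvCanon 0 c0 0 (c0 :: rest) = pvCanon 0 c0 1 rest := by
    simp [pvCanon]
  rw [hcanon]
  -- B side
  have hC := pvCuts_eq rest [] c0
  simp only [List.length_nil, Nat.cast_zero, zero_add, List.nil_append] at hC
  have hn : ((c0 :: rest).length : Int) = 1 + (rest.length : Int) := by
    push_cast [List.length_cons]; ring
  rw [hn, List.append_assoc, hC]
  rw [show ([0] ++ pvCuts 1 c0 rest : List Int) = 0 :: pvCuts 1 c0 rest from rfl]
  rw [pvPairs_eq (c0 :: rest) (0 :: pvCuts 1 c0 rest)]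
  have hZ := pvZip_canon rest [c0] 0 c0 (by simp [PySem.List.pyGetD_zero_cons])
  simp only [List.length_cons, List.length_nil, Nat.cast_one, zero_add,
    List.singleton_append] at hZ
  simp only [List.tail_cons]
  rw [hZ]
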